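-- pv_equiv track=rewrite | github.com/Abhinav-Muraleedharan/channelvarcache | src/utils.py | _get_test_prompts
-- ===== SOURCE A (Python) =====
-- def _get_test_prompts(num_prompts: int) -> list[str]:
--     """Built-in test prompts for quick debugging."""
--     base = [
--         "A photo of a cat sitting on a windowsill",
--         "A beautiful sunset over the ocean with orange and purple clouds",
--         "A robot painting a portrait in a studio",
--         "A cozy cabin in the snowy mountains at night",
--         "A bustling street market in Tokyo with colorful lanterns",
--         "An astronaut riding a horse on Mars",
--         "A steampunk cityscape with airships and clockwork towers",
--         "A bowl of ramen with steam rising, top-down view",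
--         "A field of sunflowers under a blue sky",
--         "A medieval castle on a cliff overlooking the sea",
--         "A close-up photo of a hummingbird feeding from a flower",
--         "An abstract painting with geometric shapes and bold colors",
--         "A vintage car parked in front of a diner at dusk",
--         "A corgi wearing a tiny crown sitting on a throne",
--         "A cyberpunk alleyway with neon signs reflecting in puddles",
--         "A watercolor painting of a Venetian canal",
--         "A macro photo of dewdrops on a spider web",
--         "A cozy reading nook with bookshelves and warm lighting",
--         "A futuristic space station orbiting Earth",
--         "A photorealistic portrait of an elderly fisherman",
--     ]
--     # Repeat if needed
--     while len(base) < num_prompts: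
--         base = base + base
--     return base[:num_prompts]
-- ===== SOURCE B (Python) =====
-- def _get_test_prompts(num_prompts: int) -> list[str]:
--     """Built-in test prompts for quick debugging."""
--     base = [
--         "A photo of a cat sitting on a windowsill",
--         "A beautiful sunset over the ocean with orange and purple clouds",
--         "A robot painting a portrait in a studio",
--         "A cozy cabin in the snowy mountains at night",
--         "A bustling street market in Tokyo with colorful lanterns",
--         "An astronaut riding a horse on Mars",
--         "A steampunk cityscape with airships and clockwork towers",
--         "A bowl of ramen with steam rising, top-down view",
--         "A field of sunflowers under a blue sky",
--         "A medieval castle on a cliff overlooking the sea",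
--         "A close-up photo of a hummingbird feeding from a flower",
--         "An abstract painting with geometric shapes and bold colors",
--         "A vintage car parked in front of a diner at dusk",
--         "A corgi wearing a tiny crown sitting on a throne",
--         "A cyberpunk alleyway with neon signs reflecting in puddles",
--         "A watercolor painting of a Venetian canal",
--         "A macro photo of dewdrops on a spider web",
--         "A cozy reading nook with bookshelves and warm lighting",
--         "A futuristic space station orbiting Earth",
--         "A photorealistic portrait of an elderly fisherman",
--     ]
--     reps = max(1, -(-num_prompts // len(base)))
--     return (base * reps)[:num_prompts]
-- ===== Notes on version B (the rewrite author's own statement) =====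
-- stated objective: simpler
-- what changed: Replaces the repeated self-doubling while-loop with a direct ceiling-division repetition count (max(1, ceil(n/20))) followed by one multiplication and slice.
import Mathlib
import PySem

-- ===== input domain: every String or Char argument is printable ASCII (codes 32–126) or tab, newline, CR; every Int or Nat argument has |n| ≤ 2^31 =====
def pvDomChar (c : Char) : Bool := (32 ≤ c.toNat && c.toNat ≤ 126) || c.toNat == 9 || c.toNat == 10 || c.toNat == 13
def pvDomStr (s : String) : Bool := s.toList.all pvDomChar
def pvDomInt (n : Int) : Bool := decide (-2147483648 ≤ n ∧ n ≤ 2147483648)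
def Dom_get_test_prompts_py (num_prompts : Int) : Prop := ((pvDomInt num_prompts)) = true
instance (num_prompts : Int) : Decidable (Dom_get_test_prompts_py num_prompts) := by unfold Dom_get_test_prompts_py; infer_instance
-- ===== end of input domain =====

-- B replaces A's self-doubling while-loop by a direct ceiling-division repetition count; objective: simpler.

-- the fixed `base` list literal shared by both Pythons
def pvBase : List String := [
  "A photo of a cat sitting on a windowsill",
  "A beautiful sunset over the ocean with orange and purple clouds",
  "A robot painting a portrait in a studio",
  "A cozy cabin in the snowy mountains at night",
  "A bustling street market in Tokyo with colorful lanterns",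
  "An astronaut riding a horse on Mars",
  "A steampunk cityscape with airships and clockwork towers",
  "A bowl of ramen with steam rising, top-down view",
  "A field of sunflowers under a blue sky",
  "A medieval castle on a cliff overlooking the sea",
  "A close-up photo of a hummingbird feeding from a flower",
  "An abstract painting with geometric shapes and bold colors",
  "A vintage car parked in front of a diner at dusk",
  "A corgi wearing a tiny crown sitting on a throne",
  "A cyberpunk alleyway with neon signs reflecting in puddles",
  "A watercolor painting of a Venetian canal",
  "A macro photo of dewdrops on a spider web",
  "A cozy reading nook with bookshelves and warm lighting",
  "A futuristic space station orbiting Earth",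
  "A photorealistic portrait of an elderly fisherman"
]

-- ===== PORT A =====
-- `while len(base) < num_prompts: base = base + base`; fuel is only a totality
-- guard (num_prompts.toNat iterations are always more than enough, proved below).
def pvLoopA : Nat → Int → List String → List String
  | 0, _, b => b
  | f + 1, n, b => if PySem.List.len b < n then pvLoopA f n (b ++ b) else b

def get_test_prompts_py (num_prompts : Int) : List String :=
  PySem.List.slice (pvLoopA num_prompts.toNat num_prompts pvBase) none (some num_prompts)

-- ===== PORT B =====
-- Python `base * reps` (reps ≥ 1 always, so .toNat is exact)
def pvRepeat : Nat → List String → List String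
  | 0, _ => []
  | k + 1, b => b ++ pvRepeat k b

def get_test_prompts_py_alt (num_prompts : Int) : List String :=
  let reps : Int := max 1 (-(PySem.Int.floordiv (-num_prompts) (PySem.List.len pvBase)))
  PySem.List.slice (pvRepeat reps.toNat pvBase) none (some num_prompts)

-- ===== PRECONDITION & SPEC =====
def Spec_get_test_prompts_py (num_prompts : Int) (out : List String) : Prop := out = get_test_prompts_py_alt num_prompts
instance (num_prompts : Int) (out : List String) : Decidable (Spec_get_test_prompts_py num_prompts out) := by unfold Spec_get_test_prompts_py; infer_instance

-- ===== CLAIM (what is proved, stated in full; the proofs are below) =====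
def Claim_equal_get_test_prompts_py : Prop := ∀ (num_prompts : Int), Dom_get_test_prompts_py num_prompts → Spec_get_test_prompts_py num_prompts (get_test_prompts_py num_prompts)

-- ===== LEMMAS AND PROOFS =====

theorem pvBase_length : pvBase.length = 20 := rfl

theorem pvRepeat_one (b : List String) : pvRepeat 1 b = b := by
  simp [pvRepeat]

theorem pvRepeat_length (j : Nat) (b : List String) :
    (pvRepeat j b).length = j * b.length := by
  induction j with
  | zero => simp [pvRepeat]
  | succ k ih => simp [pvRepeat, ih]; ring

theorem pvRepeat_double (j : Nat) (b : List String) :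
    pvRepeat j (b ++ b) = pvRepeat (2 * j) b := by
  induction j with
  | zero => simp [pvRepeat]
  | succ k ih =>
    simp [pvRepeat, ih, List.append_assoc]

theorem pvRepeat_prefix (j k : Nat) (b : List String) (h : j ≤ k) :
    pvRepeat j b ++ pvRepeat (k - j) b = pvRepeat k b := by
  induction j generalizing k with
  | zero => simp [pvRepeat]
  | succ i ih =>
    obtain ⟨m, rfl⟩ : ∃ m, k = m + 1 := ⟨k - 1, by omega⟩
    have hik : i ≤ m := by omega
    have : m + 1 - (i + 1) = m - i := by omega
    simp [pvRepeat, this, ← ih m hik, List.append_assoc]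

theorem pvRepeat_take (j k m : Nat) (b : List String)
    (hj : m ≤ j * b.length) (hk : m ≤ k * b.length) :
    (pvRepeat j b).take m = (pvRepeat k b).take m := by
  rcases le_total j k with h | h
  · rw [← pvRepeat_prefix j k b h,
      List.take_append_of_le_length (by rw [pvRepeat_length]; exact hj)]
  · rw [← pvRepeat_prefix k j b h,
      List.take_append_of_le_length (by rw [pvRepeat_length]; exact hk)]

-- the loop returns some pvRepeat j b with total length ≥ n, given enough fuel
theorem pvLoopA_char (n : Int) :
    ∀ (fuel : Nat) (b : List String), 1 ≤ b.length →
      n ≤ (fuel : Int) + b.length →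
      ∃ j : Nat, 1 ≤ j ∧ pvLoopA fuel n b = pvRepeat j b ∧ n ≤ (j : Int) * b.length := by
  intro fuel
  induction fuel with
  | zero =>
    intro b hb hfb
    exact ⟨1, le_refl 1, (pvRepeat_one b).symm, by simpa using hfb⟩
  | succ f ih =>
    intro b hb hfb
    by_cases hlt : PySem.List.len b < n
    · have hlen : PySem.List.len b = (b.length : Int) := PySem.List.len_eq b
      have hbb : 1 ≤ (b ++ b).length := by simp; omega
      have hfb2 : n ≤ (f : Int) + (b ++ b).length := by
        simp only [List.length_append] at *
        push_cast at *
        omega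
      obtain ⟨j, hj1, hje, hjn⟩ := ih (b ++ b) hbb hfb2
      refine ⟨2 * j, by omega, ?_, ?_⟩
      · simp only [pvLoopA, if_pos hlt, hje, pvRepeat_double]
      · simp only [List.length_append] at hjn
        push_cast at *
        nlinarith
    · refine ⟨1, le_refl 1, ?_, ?_⟩
      · simp only [pvLoopA, if_neg hlt, pvRepeat_one]
      · rw [PySem.List.len_eq] at hlt; push_cast; omega

theorem pvLoopA_stop (fuel : Nat) (n : Int) (b : List String)
    (h : ¬ PySem.List.len b < n) : pvLoopA fuel n b = b := by
  cases fuel with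
  | zero => rfl
  | succ f => simp only [pvLoopA, if_neg h]


-- ===== VERDICT (by name: the statement is the Claim_ definition above) =====
theorem get_test_prompts_py_spec : Claim_equal_get_test_prompts_py := by
  intro n _
  unfold Spec_get_test_prompts_py get_test_prompts_py get_test_prompts_py_alt
  have hlen : PySem.List.len pvBase = (20 : Int) := by
    rw [PySem.List.len_eq, pvBase_length]; rfl
  rw [hlen]
  set fd : Int := PySem.Int.floordiv (-n) 20 with hfd
  have hmul : fd * 20 + PySem.Int.mod (-n) 20 = -n := PySem.Int.floordiv_mul_add_mod (-n) 20
  have hm0 : 0 ≤ PySem.Int.mod (-n) 20 := PySem.Int.mod_nonneg (-n) (by norm_num)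
  have hm20 : PySem.Int.mod (-n) 20 < 20 := PySem.Int.mod_lt (-n) (by norm_num)
  by_cases hle : n ≤ 20
  · -- loop never runs and reps = 1: both sides slice pvBase
    have hA : pvLoopA n.toNat n pvBase = pvBase := by
      apply pvLoopA_stop
      rw [hlen]; omega
    have hr : max 1 (-fd) = 1 := by
      have : -20 ≤ fd * 20 := by omega
      have : -1 ≤ fd := by nlinarith
      omega
    rw [hA, hr]
    norm_num [pvRepeat_one]
  · -- n > 20: both sides are take n.toNat of a pvRepeat long enough
    rw [not_le] at hle
    have hfd2 : fd ≤ -2 := by nlinarith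
    have hr : max 1 (-fd) = -fd := by omega
    rw [hr]
    obtain ⟨j, hj1, hje, hjn⟩ := pvLoopA_char n n.toNat pvBase
      (by rw [pvBase_length]; omega) (by omega)
    rw [hje]
    rw [PySem.List.slice_to _ (by omega : (0:Int) ≤ n),
        PySem.List.slice_to _ (by omega : (0:Int) ≤ n)]
    apply pvRepeat_take
    · rw [pvBase_length]
      rw [pvBase_length] at hjn
      omega
    · rw [pvBase_length]
      have h1 : n ≤ -fd * 20 := by omega
      have h2 : (0:Int) ≤ -fd := by omega
      have h3 : ((-fd).toNat : Int) = -fd := Int.toNat_of_nonneg h2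
      omega
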